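-- pv_equiv track=rewrite | github.com/Ryanespejo/Personal-website | api/tennis-elo.py | find_player
-- ===== SOURCE A (Python) =====
-- def find_player(players: list, query: str) -> list:
--     """Fuzzy match players by name."""
--     query_lower = query.lower().strip()
--     exact = [p for p in players if p['name'].lower() == query_lower]
--     if exact:
--         return exact
--
--     # Try last-name match
--     last_name_matches = [
--         p for p in players
--         if query_lower == p['name'].split()[-1].lower()
--     ]
--     if last_name_matches:
--         return last_name_matches
--
--     # Substring match
--     return [p for p in players if query_lower in p['name'].lower()]
-- ===== SOURCE B (Python) =====
-- def find_player(players: list, query: str) -> list: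
--     """Fuzzy match players by name: rank every player once, keep the best rank."""
--     query_lower = query.lower().strip()
--
--     def rank(p):
--         name = p['name']
--         if name.lower() == query_lower:
--             return 0
--         parts = name.split()
--         if parts and parts[-1].lower() == query_lower:
--             return 1
--         if query_lower in name.lower():
--             return 2
--         return 3
--
--     ranks = [rank(p) for p in players]
--     best = min(ranks, default=3)
--     return [p for p, r in zip(players, ranks) if r == best and best != 3]
-- ===== Notes on version B (the rewrite author's own statement) =====
-- stated objective: alternative
-- what changed: Instead of A's three staged filter passes with early returns, B scores every player once on a 0-3 rank scale (exact/last-name/substring/none), takes the minimum rank, and returns the players achieving it.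
-- crash fix: On inputs with no exact match where some player's name has no words (whitespace-only), A raises IndexError on name.split()[-1]; B's guarded rank function returns the rank-based result there. — e.g. on find_player([[("name", " ")], [("name", "Ana Lopez")]], "lopez"): A raises IndexError, B returns [[("name", "Ana Lopez")]]
import Mathlib
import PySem

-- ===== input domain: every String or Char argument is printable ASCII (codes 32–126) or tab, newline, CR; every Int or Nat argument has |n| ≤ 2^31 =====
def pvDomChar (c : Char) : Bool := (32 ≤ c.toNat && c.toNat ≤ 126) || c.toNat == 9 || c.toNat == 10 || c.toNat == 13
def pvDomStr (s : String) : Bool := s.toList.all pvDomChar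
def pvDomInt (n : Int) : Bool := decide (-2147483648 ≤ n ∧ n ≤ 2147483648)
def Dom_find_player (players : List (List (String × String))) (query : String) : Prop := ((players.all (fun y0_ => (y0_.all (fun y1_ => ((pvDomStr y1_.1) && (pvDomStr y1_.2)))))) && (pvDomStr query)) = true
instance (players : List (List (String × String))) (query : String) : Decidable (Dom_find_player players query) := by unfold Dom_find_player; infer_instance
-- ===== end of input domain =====

-- B replaces A's three staged filter passes by ranking each player once (0 exact / 1 last-name / 2 substring / 3 none) and keeping the minimum rank (objective: alternative, same cost).

-- p['name'] on the assoc-list dict: first match; Pre_ guarantees the key exists, so getD "" is never used.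
def pvNameOpt (p : List (String × String)) : Option String :=
  (p.find? (fun kv => kv.1 == "name")).map (·.2)

def pvName (p : List (String × String)) : String := (pvNameOpt p).getD ""

-- ===== PORT A =====
def find_player (players : List (List (String × String))) (query : String) : List (List (String × String)) :=
  let query_lower := PySem.Str.strip (PySem.Str.lower query)
  let exact := players.filter (fun p => PySem.Str.lower (pvName p) == query_lower)
  if exact = [] then
    let last_name_matches := players.filter (fun p =>
      query_lower == PySem.Str.lower ((PySem.List.pyGet? (PySem.Str.split₀ (pvName p)) (-1)).getD ""))
    if last_name_matches = [] then
      players.filter (fun p => PySem.Str.isIn query_lower (PySem.Str.lower (pvName p)))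
    else last_name_matches
  else exact

-- ===== PORT B =====
-- rank(p) from Source B: 0 exact, 1 last-name (guarded by 'if parts'), 2 substring, 3 otherwise.
def pvRank (ql : String) (p : List (String × String)) : Nat :=
  let name := pvName p
  if PySem.Str.lower name == ql then 0
  else if (match PySem.List.pyGet? (PySem.Str.split₀ name) (-1) with
           | some w => PySem.Str.lower w == ql
           | none => false) then 1
  else if PySem.Str.isIn ql (PySem.Str.lower name) then 2
  else 3

def find_player_alt (players : List (List (String × String))) (query : String) : List (List (String × String)) :=
  let query_lower := PySem.Str.strip (PySem.Str.lower query)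
  let ranks := players.map (pvRank query_lower)
  let best := (PySem.List.min? ranks (fun x => x)).getD 3
  ((players.zip ranks).filter (fun pr => pr.2 == best && best != 3)).map Prod.fst

-- ===== PRECONDITION & SPEC =====
-- Pre_ excludes exactly the inputs where the Python A raises: a player dict without a 'name' key
-- (KeyError in the first comprehension), and — when no exact match short-circuits the function —
-- a name with no words, where name.split()[-1] raises IndexError.
def Pre_find_player (players : List (List (String × String))) (query : String) : Prop :=
  (∀ p ∈ players, (pvNameOpt p).isSome = true) ∧
  ((∃ p ∈ players, PySem.Str.lower ((pvNameOpt p).getD "") = PySem.Str.strip (PySem.Str.lower query)) ∨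
   (∀ p ∈ players, PySem.Str.split₀ ((pvNameOpt p).getD "") ≠ []))
instance (players : List (List (String × String))) (query : String) : Decidable (Pre_find_player players query) := by unfold Pre_find_player; infer_instance

def pvWitness_find_player : (List (List (String × String))) × String := ([[("name", "Bob Smith")], [("name", "Ana")]], " smith ")

-- On inputs with no exact match where some player's name has no words (whitespace-only), A raises
-- IndexError on name.split()[-1]; B's guarded rank function returns the rank-based result there.
def Raises_find_player (players : List (List (String × String))) (query : String) : Prop :=
  (∀ p ∈ players, (pvNameOpt p).isSome = true) ∧
  (∀ p ∈ players, ¬ PySem.Str.lower ((pvNameOpt p).getD "") = PySem.Str.strip (PySem.Str.lower query)) ∧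
  (∃ p ∈ players, PySem.Str.split₀ ((pvNameOpt p).getD "") = [])
instance (players : List (List (String × String))) (query : String) : Decidable (Raises_find_player players query) := by unfold Raises_find_player; infer_instance

def pvRaiseWitness_find_player : (List (List (String × String))) × String := ([[("name", "  ")], [("name", "Ana Lopez")]], "lopez")
def pvRaiseWitnessOut_find_player : List (List (String × String)) := [[("name", "Ana Lopez")]]

def Spec_find_player (players : List (List (String × String))) (query : String) (out : List (List (String × String))) : Prop := out = find_player_alt players query
instance (players : List (List (String × String))) (query : String) (out : List (List (String × String))) : Decidable (Spec_find_player players query out) := by unfold Spec_find_player; infer_instance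

-- ===== CLAIM (what is proved, stated in full; the proofs are below) =====
def Claim_equal_find_player : Prop := ∀ (players : List (List (String × String))) (query : String), Dom_find_player players query → Pre_find_player players query → Spec_find_player players query (find_player players query)

def Claim_raises_find_player : Prop := (∀ (players : List (List (String × String))) (query : String), Dom_find_player players query → Raises_find_player players query → ¬ Pre_find_player players query) ∧ (Dom_find_player (pvRaiseWitness_find_player.1) (pvRaiseWitness_find_player.2) ∧ Raises_find_player (pvRaiseWitness_find_player.1) (pvRaiseWitness_find_player.2) ∧ find_player_alt (pvRaiseWitness_find_player.1) (pvRaiseWitness_find_player.2) = pvRaiseWitnessOut_find_player)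


-- ===== LEMMAS AND PROOFS =====

-- a nonempty word list has a last element under Python's xs[-1]
theorem pv_last_some {l : List String} (h : l ≠ []) :
    ∃ w, PySem.List.pyGet? l (-1) = some w := by
  cases l with
  | nil => exact absurd rfl h
  | cons a t =>
    simp only [PySem.List.pyGet?, PySem.List.pyIdx?]
    norm_num

-- zip players with their ranks, filter on the rank, project back = filter on the rank of each element
theorem pv_alt_filter {α : Type} (f : α → Nat) (b : Nat) (l : List α) :
    (((l.zip (l.map f)).filter (fun pr => pr.2 == b && b != 3)).map Prod.fst)
      = l.filter (fun p => f p == b && b != 3) := by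
  induction l with
  | nil => rfl
  | cons a t ih =>
    simp only [List.map_cons, List.zip_cons_cons, List.filter_cons]
    by_cases h : (f a == b && b != 3) = true <;> simp [h, ih]

-- the minimum rank: if k is attained and is a lower bound, min(ranks, default=d) = k
theorem pv_min_eq {l : List Nat} {k d : Nat} (hk : k ∈ l) (hlb : ∀ x ∈ l, k ≤ x) :
    (PySem.List.min? l (fun x => x)).getD d = k := by
  cases hm : PySem.List.min? l (fun x => x) with
  | none =>
    rw [PySem.List.min?_eq_none_iff] at hm
    subst hm; cases hk
  | some m =>
    have h1 := PySem.List.min?_mem hm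
    have h2 := PySem.List.min?_isMin hm k hk
    have h3 := hlb m h1
    simp; omega

theorem pv_min_all3 {l : List Nat} {d : Nat} (h : ∀ x ∈ l, x = 3) (hd : d = 3) :
    (PySem.List.min? l (fun x => x)).getD d = 3 := by
  cases hm : PySem.List.min? l (fun x => x) with
  | none => simp [hd]
  | some m => simpa using h m (PySem.List.min?_mem hm)

-- rank characterizations
theorem pvRank_beq_zero (ql : String) (p : List (String × String)) :
    (pvRank ql p == 0) = (PySem.Str.lower (pvName p) == ql) := by
  simp only [pvRank]
  split_ifs with h1 h2 h3 <;> simp [h1]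

theorem pvRank_ge_one {ql : String} {p : List (String × String)}
    (h : (PySem.Str.lower (pvName p) == ql) = false) : 1 ≤ pvRank ql p := by
  simp only [pvRank, h]
  split_ifs <;> simp_all

theorem pvRank_beq_one {ql : String} {p : List (String × String)}
    (h : (PySem.Str.lower (pvName p) == ql) = false)
    (hs : PySem.Str.split₀ (pvName p) ≠ []) :
    (pvRank ql p == 1)
      = (ql == PySem.Str.lower ((PySem.List.pyGet? (PySem.Str.split₀ (pvName p)) (-1)).getD "")) := by
  obtain ⟨w, hw⟩ := pv_last_some hs
  simp only [pvRank, h, hw, Option.getD_some]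
  by_cases h2 : (PySem.Str.lower w == ql) = true
  · have he : ql = PySem.Str.lower w := (beq_iff_eq.mp h2).symm
    simp [he]
  · have h2' : (PySem.Str.lower w == ql) = false := by
      cases hb : (PySem.Str.lower w == ql) with
      | false => rfl
      | true => exact absurd hb h2
    have hq : (ql == PySem.Str.lower w) = false :=
      beq_eq_false_iff_ne.mpr (fun hh => (beq_eq_false_iff_ne.mp h2') hh.symm)
    rw [h2', hq]
    split_ifs <;> simp

theorem pvRank_two_three {ql : String} {p : List (String × String)}
    (h : (PySem.Str.lower (pvName p) == ql) = false)
    (hL : (ql == PySem.Str.lower ((PySem.List.pyGet? (PySem.Str.split₀ (pvName p)) (-1)).getD "")) = false)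
    (hs : PySem.Str.split₀ (pvName p) ≠ []) :
    pvRank ql p = if PySem.Str.isIn ql (PySem.Str.lower (pvName p)) then 2 else 3 := by
  obtain ⟨w, hw⟩ := pv_last_some hs
  simp only [pvRank, h, hw]
  rw [hw, Option.getD_some] at hL
  have h2 : (PySem.Str.lower w == ql) = false :=
    beq_eq_false_iff_ne.mpr (fun hh => (beq_eq_false_iff_ne.mp hL) hh.symm)
  simp [h2]

-- ===== VERDICT (by name: the statement is the Claim_ definition above) =====
theorem find_player_spec : Claim_equal_find_player := by
  intro players query _ hpre
  obtain ⟨hname, hpre2⟩ := hpre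
  unfold Spec_find_player find_player find_player_alt
  simp only [pv_alt_filter]
  set ql := PySem.Str.strip (PySem.Str.lower query) with hql
  by_cases hE : players.filter (fun p => PySem.Str.lower (pvName p) == ql) = []
  · -- no exact match
    rw [if_pos hE]
    have hEall : ∀ p ∈ players, (PySem.Str.lower (pvName p) == ql) = false := by
      intro p hp
      have := List.filter_eq_nil_iff.mp hE p hp
      simpa using this
    have hsplit : ∀ p ∈ players, PySem.Str.split₀ (pvName p) ≠ [] := by
      cases hpre2 with
      | inl h =>
        obtain ⟨p, hp, hpe⟩ := h
        have hpf := hEall p hp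
        have hn : pvName p = (pvNameOpt p).getD "" := rfl
        rw [hn] at hpf
        simp [hpe] at hpf
      | inr h => exact fun p hp => h p hp
    by_cases hL : players.filter (fun p =>
        ql == PySem.Str.lower ((PySem.List.pyGet? (PySem.Str.split₀ (pvName p)) (-1)).getD "")) = []
    · -- no last-name match either: substring tier (or empty result)
      rw [if_pos hL]
      have hLall : ∀ p ∈ players,
          (ql == PySem.Str.lower ((PySem.List.pyGet? (PySem.Str.split₀ (pvName p)) (-1)).getD "")) = false := by
        intro p hp
        have := List.filter_eq_nil_iff.mp hL p hp
        simpa using this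
      have hr23 : ∀ p ∈ players,
          pvRank ql p = if PySem.Str.isIn ql (PySem.Str.lower (pvName p)) then 2 else 3 :=
        fun p hp => pvRank_two_three (hEall p hp) (hLall p hp) (hsplit p hp)
      by_cases hS : players.filter (fun p => PySem.Str.isIn ql (PySem.Str.lower (pvName p))) = []
      · -- nothing matches at all: every rank is 3
        have hall3 : ∀ x ∈ players.map (pvRank ql), x = 3 := by
          intro x hx
          obtain ⟨p, hp, rfl⟩ := List.mem_map.mp hx
          have hs3 := List.filter_eq_nil_iff.mp hS p hp
          rw [hr23 p hp, if_neg (by simpa using hs3)]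
        rw [pv_min_all3 hall3 rfl, hS]
        refine (List.filter_eq_nil_iff.mpr ?_).symm
        intro p hp
        simp
      · -- substring tier: minimum rank is 2
        have hex : ∃ p ∈ players, PySem.Str.isIn ql (PySem.Str.lower (pvName p)) = true := by
          rw [List.filter_eq_nil_iff] at hS
          push Not at hS
          simpa using hS
        obtain ⟨p2, hp2, hS2⟩ := hex
        have h2mem : 2 ∈ players.map (pvRank ql) :=
          List.mem_map.mpr ⟨p2, hp2, by rw [hr23 p2 hp2, if_pos hS2]⟩
        have hlb : ∀ x ∈ players.map (pvRank ql), 2 ≤ x := by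
          intro x hx
          obtain ⟨p, hp, rfl⟩ := List.mem_map.mp hx
          rw [hr23 p hp]
          split_ifs <;> omega
        rw [pv_min_eq h2mem hlb]
        refine (List.filter_congr ?_).symm
        intro p hp
        rw [hr23 p hp, show ((2 : Nat) != 3) = true from rfl, Bool.and_true]
        by_cases hsp : PySem.Str.isIn ql (PySem.Str.lower (pvName p)) = true
        · rw [if_pos hsp, hsp]; decide
        · have hf : PySem.Str.isIn ql (PySem.Str.lower (pvName p)) = false := by simpa using hsp
          rw [if_neg hsp, hf]; decide
    · -- last-name tier: minimum rank is 1
      rw [if_neg hL]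
      have hex : ∃ p ∈ players,
          (ql == PySem.Str.lower ((PySem.List.pyGet? (PySem.Str.split₀ (pvName p)) (-1)).getD "")) = true := by
        rw [List.filter_eq_nil_iff] at hL
        push Not at hL
        simpa using hL
      obtain ⟨p1, hp1, hL1⟩ := hex
      have hrank1 : pvRank ql p1 = 1 := by
        have h1 := pvRank_beq_one (hEall p1 hp1) (hsplit p1 hp1)
        rw [hL1] at h1
        exact beq_iff_eq.mp h1
      have h1mem : 1 ∈ players.map (pvRank ql) := List.mem_map.mpr ⟨p1, hp1, hrank1⟩
      have hlb : ∀ x ∈ players.map (pvRank ql), 1 ≤ x := by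
        intro x hx
        obtain ⟨p, hp, rfl⟩ := List.mem_map.mp hx
        exact pvRank_ge_one (hEall p hp)
      rw [pv_min_eq h1mem hlb]
      refine (List.filter_congr ?_).symm
      intro p hp
      rw [show ((1 : Nat) != 3) = true from rfl, Bool.and_true]
      exact pvRank_beq_one (hEall p hp) (hsplit p hp)
  · -- exact match exists: minimum rank is 0
    rw [if_neg hE]
    have hex : ∃ p ∈ players, (PySem.Str.lower (pvName p) == ql) = true := by
      rw [List.filter_eq_nil_iff] at hE
      push Not at hE
      simpa using hE
    obtain ⟨p0, hp0mem, hp0⟩ := hex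
    have h0mem : 0 ∈ players.map (pvRank ql) :=
      List.mem_map.mpr ⟨p0, hp0mem, by simp [pvRank, hp0]⟩
    rw [pv_min_eq h0mem (fun x _ => Nat.zero_le x)]
    refine (List.filter_congr ?_).symm
    intro p _
    rw [pvRank_beq_zero]
    simp

@[simp] theorem find_player_raises : Claim_raises_find_player := by
  unfold Claim_raises_find_player
  constructor
  · intro players query _ ⟨h1, h2, p, hp, hsplit⟩ ⟨_, hpre⟩
    cases hpre with
    | inl h => obtain ⟨q, hq, hqe⟩ := h; exact h2 q hq hqe
    | inr h => exact h p hp hsplit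
  · exact ⟨by decide, by decide, by decide⟩
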